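-- pv_equiv track=rewrite | github.com/Raresney/Python-Project | Project.py | get_unique_indices
-- ===== SOURCE A (Python) =====
-- def get_unique_indices(data_list):
--     """Returneaza indicii primelor aparitii ale elementelor unice dintr-o lista."""
--     seen = set()
--     indices = []
--     for idx, item in enumerate(data_list):
--         if item not in seen:
--             seen.add(item)
--             indices.append(idx)
--     return indices
-- ===== SOURCE B (Python) =====
-- def get_unique_indices(data_list):
--     """Returneaza indicii primelor aparitii ale elementelor unice dintr-o lista."""
--     unique = list(dict.fromkeys(data_list))
--     return [data_list.index(x) for x in unique]
-- ===== Notes on version B (the rewrite author's own statement) =====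
-- stated objective: alternative
-- what changed: Replaces A's single pass maintaining a seen-set and conditional index appends by two staged passes: first deduplicate preserving order with dict.fromkeys, then look up each unique element's first position with list.index scans.
import Mathlib
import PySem

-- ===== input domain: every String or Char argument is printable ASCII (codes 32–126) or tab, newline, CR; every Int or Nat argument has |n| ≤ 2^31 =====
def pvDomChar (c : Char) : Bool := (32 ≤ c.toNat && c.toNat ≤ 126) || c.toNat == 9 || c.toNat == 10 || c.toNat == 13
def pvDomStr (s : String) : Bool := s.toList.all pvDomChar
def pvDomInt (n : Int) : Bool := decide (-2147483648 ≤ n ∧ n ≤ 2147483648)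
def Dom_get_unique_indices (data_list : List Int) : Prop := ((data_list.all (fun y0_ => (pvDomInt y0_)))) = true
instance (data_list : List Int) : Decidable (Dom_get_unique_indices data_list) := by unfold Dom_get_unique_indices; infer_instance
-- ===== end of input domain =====

-- B: same return values via a different decomposition — dedup first (dict.fromkeys), then find each unique element's first position with list.index; no speed claim.
-- ===== PORT A =====
def get_unique_indices (data_list : List Int) : List Int :=
  -- seen = set(); indices = []; for idx, item in enumerate(data_list): if item not in seen: seen.add(item); indices.append(idx)
  ((PySem.List.enumerate data_list 0).foldl
    (fun (st : PySem.Set Int × List Int) p =>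
      if PySem.Set.contains st.1 p.2 then st
      else (PySem.Set.add st.1 p.2, st.2 ++ [p.1]))
    (PySem.Set.empty, [])).2

-- ===== PORT B =====
def get_unique_indices_alt (data_list : List Int) : List Int :=
  -- unique = list(dict.fromkeys(data_list)); return [data_list.index(x) for x in unique]
  -- data_list.index(x) is PySem.List.index?; every x of the dedup is in data_list, so it is
  -- always `some`; `.getD 0` is its total form (the default branch is unreachable).
  (PySem.List.dedup data_list).map
    (fun x => (((PySem.List.index? data_list x).getD 0 : Nat) : Int))

-- ===== PRECONDITION & SPEC =====
def Spec_get_unique_indices (data_list : List Int) (out : List Int) : Prop := out = get_unique_indices_alt data_list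
instance (data_list : List Int) (out : List Int) : Decidable (Spec_get_unique_indices data_list out) := by unfold Spec_get_unique_indices; infer_instance

-- ===== CLAIM =====
def Claim_equal_get_unique_indices : Prop := ∀ (data_list : List Int), Dom_get_unique_indices data_list → Spec_get_unique_indices data_list (get_unique_indices data_list)

-- ===== LEMMAS AND PROOFS =====

-- A's loop step
def stepA (st : PySem.Set Int × List Int) (p : Int × Int) : PySem.Set Int × List Int :=
  if PySem.Set.contains st.1 p.2 then st
  else (PySem.Set.add st.1 p.2, st.2 ++ [p.1])

theorem stepA_fst (st : PySem.Set Int × List Int) (p : Int × Int) :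
    (stepA st p).1 = PySem.Set.add st.1 p.2 := by
  unfold stepA PySem.Set.add
  by_cases h : p.2 ∈ st.1 <;> simp [h]

-- the seen-set after folding a prefix is exactly set(prefix) built on top of the start
theorem foldA_fst (xs : List Int) (s : Int) (st : PySem.Set Int × List Int) :
    (((PySem.List.enumerate xs s).foldl stepA st)).1 = xs.foldl PySem.Set.add st.1 := by
  induction xs generalizing s st with
  | nil => simp [PySem.List.enumerate_nil]
  | cons x t ih =>
    rw [PySem.List.enumerate_cons]
    simp only [List.foldl_cons]
    rw [ih, stepA_fst]

theorem ofList_append_singleton (xs : List Int) (x : Int) :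
    PySem.Set.ofList (xs ++ [x]) = PySem.Set.add (PySem.Set.ofList xs) x := by
  rw [PySem.Set.ofList_eq_foldl, PySem.Set.ofList_eq_foldl, List.foldl_append]
  rfl

theorem get_unique_indices_eq_alt (data : List Int) :
    get_unique_indices data = get_unique_indices_alt data := by
  induction data using List.reverseRecOn with
  | nil => rfl
  | append_singleton xs x ih =>
    unfold get_unique_indices get_unique_indices_alt at *
    rw [PySem.List.enumerate_append, List.foldl_append,
        PySem.List.enumerate_cons, PySem.List.enumerate_nil]
    set P := (PySem.List.enumerate xs (0 : Int)).foldl stepA (PySem.Set.empty, []) with hP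
    have hfold : (PySem.List.enumerate xs (0 : Int)).foldl
        (fun (st : PySem.Set Int × List Int) p =>
          if PySem.Set.contains st.1 p.2 then st
          else (PySem.Set.add st.1 p.2, st.2 ++ [p.1]))
        (PySem.Set.empty, []) = P := rfl
    rw [hfold]
    rw [hfold] at ih
    simp only [PySem.List.dedup_eq_ofList] at ih
    have hseen : P.1 = PySem.Set.ofList xs := by
      rw [hP, foldA_fst, PySem.Set.ofList_eq_foldl]; rfl
    have hcongr : ∀ (t : List Int),
        (PySem.Set.ofList xs).map (fun y => (((PySem.List.index? (xs ++ t) y).getD 0 : Nat) : Int))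
        = (PySem.Set.ofList xs).map (fun y => (((PySem.List.index? xs y).getD 0 : Nat) : Int)) := by
      intro t
      refine List.map_congr_left (fun y hy => ?_)
      rw [PySem.List.index?_append_of_mem t ((PySem.Set.mem_ofList _ _).mp hy)]
    simp only [List.foldl_cons, List.foldl_nil, PySem.List.dedup_eq_ofList,
      ofList_append_singleton]
    by_cases hx : x ∈ xs
    · have hc : PySem.Set.contains P.1 x = true := by
        rw [hseen]; simpa [PySem.Set.contains] using (PySem.Set.mem_ofList _ _).mpr hx
      have hadd : PySem.Set.add (PySem.Set.ofList xs) x = PySem.Set.ofList xs := by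
        unfold PySem.Set.add
        rw [if_pos (by simpa [PySem.Set.contains] using (PySem.Set.mem_ofList _ _).mpr hx)]
      rw [if_pos hc, hadd, hcongr [x]]
      exact ih
    · have hnm : x ∉ PySem.Set.ofList xs :=
        fun m => hx ((PySem.Set.mem_ofList _ _).mp m)
      have hc : ¬ PySem.Set.contains P.1 x = true := by
        rw [hseen]; simpa [PySem.Set.contains] using hnm
      have hadd : PySem.Set.add (PySem.Set.ofList xs) x = PySem.Set.ofList xs ++ [x] := by
        unfold PySem.Set.add
        rw [if_neg (by simpa [PySem.Set.contains] using hnm)]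
      rw [if_neg hc, hadd, List.map_append, hcongr [x], ← ih, List.map_singleton,
          PySem.List.index?_append_singleton_self xs x hx]
      simp

theorem get_unique_indices_spec : Claim_equal_get_unique_indices := by
  intro data _
  exact get_unique_indices_eq_alt data
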